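-- pv_equiv track=rewrite | github.com/TencentBlueKing/blueking-apigateway | src/dashboard/apigateway/apigateway/apps/data_plane/management/commands/create_data_plane.py | _is_namespace_prefix
-- ===== SOURCE A (Python) =====
-- def _normalize_prefix(prefix: str) -> str:
--     parts = [part for part in prefix.strip().split("/") if part]
--     if not parts:
--         return "/"
--     return "/" + "/".join(parts)
--
-- def _is_namespace_prefix(left: str, right: str) -> bool:
--     left_norm = _normalize_prefix(left)
--     right_norm = _normalize_prefix(right)
--
--     if left_norm == "/":
--         return True
--     if right_norm == "/":
--         return False
--
--     left_parts = [part for part in left_norm.strip("/").split("/") if part]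
--     right_parts = [part for part in right_norm.strip("/").split("/") if part]
--     if len(left_parts) > len(right_parts):
--         return False
--     return right_parts[: len(left_parts)] == left_parts
-- ===== SOURCE B (Python) =====
-- def _normalize_prefix(prefix: str) -> str:
--     parts = [part for part in prefix.strip().split("/") if part]
--     if not parts:
--         return "/"
--     return "/" + "/".join(parts)
--
--
-- def _is_namespace_prefix(left: str, right: str) -> bool:
--     left_norm = _normalize_prefix(left)
--     right_norm = _normalize_prefix(right)
--     if left_norm == "/":
--         return True
--     if right_norm == "/":
--         return False
--     return right_norm == left_norm or right_norm.startswith(left_norm + "/")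
-- ===== Notes on version B (the rewrite author's own statement) =====
-- stated objective: simpler
-- what changed: After normalizing both paths, B drops A's second strip/split/filter pass and slice comparison entirely and decides prefix-ness on the canonical strings themselves: right_norm == left_norm or right_norm.startswith(left_norm + '/').
import Mathlib
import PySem

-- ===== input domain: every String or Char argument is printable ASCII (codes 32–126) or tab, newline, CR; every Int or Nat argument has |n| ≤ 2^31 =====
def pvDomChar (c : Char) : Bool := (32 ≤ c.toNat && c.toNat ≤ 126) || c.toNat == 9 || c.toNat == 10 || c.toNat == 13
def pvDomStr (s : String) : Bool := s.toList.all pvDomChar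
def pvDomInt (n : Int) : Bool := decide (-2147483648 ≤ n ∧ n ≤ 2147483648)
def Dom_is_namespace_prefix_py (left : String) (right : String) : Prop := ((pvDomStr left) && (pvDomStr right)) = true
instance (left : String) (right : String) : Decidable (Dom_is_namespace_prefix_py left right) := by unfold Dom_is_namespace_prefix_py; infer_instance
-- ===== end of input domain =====

-- B drops A's second strip/split/filter pass and compares the normalized strings directly
-- (equality, or prefix up to a '/' boundary); same O(n) cost, simpler decomposition.

-- ===== PORT A =====
-- shared helper: Python _normalize_prefix (used verbatim by both A and B)
def pvNormalize (s : List Char) : List Char :=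
  let parts := (PySem.Chars.splitOn (PySem.Chars.strip s) ['/']).filter (fun p => !p.isEmpty)
  if parts = [] then ['/'] else '/' :: PySem.Chars.join ['/'] parts

def is_namespace_prefix_py (left : String) (right : String) : Bool :=
  let ln := pvNormalize left.toList
  let rn := pvNormalize right.toList
  if ln = ['/'] then true
  else if rn = ['/'] then false
  else
    let lp := (PySem.Chars.splitOn (PySem.Chars.stripChars ln ['/']) ['/']).filter (fun p => !p.isEmpty)
    let rp := (PySem.Chars.splitOn (PySem.Chars.stripChars rn ['/']) ['/']).filter (fun p => !p.isEmpty)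
    if lp.length > rp.length then false
    else PySem.List.slice rp none (some (lp.length : Int)) == lp

-- ===== PORT B =====
def is_namespace_prefix_py_alt (left : String) (right : String) : Bool :=
  let ln := pvNormalize left.toList
  let rn := pvNormalize right.toList
  if ln = ['/'] then true
  else if rn = ['/'] then false
  else rn == ln || PySem.Chars.startswith rn (ln ++ ['/'])

-- ===== PRECONDITION & SPEC =====
def Spec_is_namespace_prefix_py (left : String) (right : String) (out : Bool) : Prop := out = is_namespace_prefix_py_alt left right
instance (left : String) (right : String) (out : Bool) : Decidable (Spec_is_namespace_prefix_py left right out) := by unfold Spec_is_namespace_prefix_py; infer_instance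

-- ===== CLAIM (what is proved, stated in full; the proofs are below) =====
def Claim_equal_is_namespace_prefix_py : Prop := ∀ (left : String) (right : String), Dom_is_namespace_prefix_py left right → Spec_is_namespace_prefix_py left right (is_namespace_prefix_py left right)

-- ===== LEMMAS AND PROOFS =====

def pvSplit : List Char → List Char → List (List Char)
  | [], cur => [cur.reverse]
  | c :: rest, cur => if c = '/' then cur.reverse :: pvSplit rest [] else pvSplit rest (c :: cur)

theorem pvGo_eq : ∀ (fuel : Nat) (l cur : List Char) (acc : List (List Char)), l.length ≤ fuel →
    PySem.Chars.splitOn.go ['/'] fuel l cur acc = acc.reverse ++ pvSplit l cur := by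
  intro fuel
  induction fuel with
  | zero =>
    intro l cur acc h
    have : l = [] := List.length_eq_zero_iff.mp (Nat.le_zero.mp h)
    subst this
    simp [PySem.Chars.splitOn.go, pvSplit]
  | succ n ih =>
    intro l cur acc h
    cases l with
    | nil => simp [PySem.Chars.splitOn.go, pvSplit]
    | cons c rest =>
      simp only [PySem.Chars.splitOn.go]
      by_cases hc : c = '/'
      · subst hc
        rw [if_pos (by simp [List.isPrefixOf])]
        simp only [List.length_cons, List.drop_succ_cons, List.length_nil, List.drop_zero]
        rw [ih rest [] _ (by simpa using Nat.le_of_succ_le_succ h)]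
        simp [pvSplit]
      · rw [if_neg (by simp [List.isPrefixOf, Ne.symm hc])]
        rw [ih rest (c :: cur) acc (by simpa using Nat.le_of_succ_le_succ h)]
        simp [pvSplit, hc]

theorem pvSplitOn_eq (l : List Char) : PySem.Chars.splitOn l ['/'] = pvSplit l [] := by
  rw [PySem.Chars.splitOn, pvGo_eq (l.length + 1) l [] [] (by omega)]
  simp
theorem pvSplit_no_slash : ∀ (l cur : List Char), '/' ∉ cur → ∀ x ∈ pvSplit l cur, '/' ∉ x := by
  intro l
  induction l with
  | nil => intro cur hc x hx; simp [pvSplit] at hx; subst hx; simpa using hc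
  | cons c rest ih =>
    intro cur hc x hx
    by_cases h : c = '/'
    · subst h
      simp [pvSplit] at hx
      rcases hx with hx | hx
      · subst hx; simpa using hc
      · exact ih [] (by simp) x hx
    · simp [pvSplit, h] at hx
      exact ih (c :: cur) (by simp [hc, Ne.symm h]) x hx

theorem pvSplit_of_no_slash (p : List Char) (hp : '/' ∉ p) : ∀ cur, pvSplit p cur = [cur.reverse ++ p] := by
  induction p with
  | nil => intro cur; simp [pvSplit]
  | cons c rest ih =>
    intro cur
    have hc : c ≠ '/' := fun h => hp (h ▸ List.mem_cons_self)
    have hr : '/' ∉ rest := fun h => hp (List.mem_cons_of_mem _ h)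
    simp [pvSplit, hc, ih hr]

theorem pvSplit_append (p : List Char) (hp : '/' ∉ p) (rest : List Char) :
    ∀ cur, pvSplit (p ++ '/' :: rest) cur = (cur.reverse ++ p) :: pvSplit rest [] := by
  induction p with
  | nil => intro cur; simp [pvSplit]
  | cons c p' ih =>
    intro cur
    have hc : c ≠ '/' := fun h => hp (h ▸ List.mem_cons_self)
    have hr : '/' ∉ p' := fun h => hp (List.mem_cons_of_mem _ h)
    simp [pvSplit, hc, ih hr]

def pvGood (P : List (List Char)) : Prop := ∀ p ∈ P, p ≠ [] ∧ '/' ∉ p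

theorem pvResplit (P : List (List Char)) (hg : pvGood P) (hne : P ≠ []) :
    (pvSplit (PySem.Chars.join ['/'] P) []).filter (fun p => !p.isEmpty) = P := by
  induction P with
  | nil => exact absurd rfl hne
  | cons p P' ih =>
    have hp := hg p List.mem_cons_self
    cases P' with
    | nil =>
      rw [PySem.Chars.join_singleton, pvSplit_of_no_slash p hp.2]
      have h1 : p.isEmpty = false := by simp [hp.1]
      simp [List.filter, h1]
    | cons q Q' =>
      rw [PySem.Chars.join_cons_cons]
      have : p ++ ['/'] ++ PySem.Chars.join ['/'] (q :: Q') = p ++ '/' :: PySem.Chars.join ['/'] (q :: Q') := by simp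
      rw [this, pvSplit_append p hp.2]
      have ih' := ih (fun x hx => hg x (List.mem_cons_of_mem _ hx)) (by simp)
      simp only [List.reverse_nil, List.nil_append, List.filter_cons]
      rw [ih']
      simp [List.isEmpty_eq_false_iff, hp.1]

theorem pvHead_join (P : List (List Char)) (hg : pvGood P) (hne : P ≠ []) :
    ∃ c t, PySem.Chars.join ['/'] P = c :: t ∧ c ≠ '/' := by
  cases P with
  | nil => exact absurd rfl hne
  | cons p P' =>
    have hp := hg p List.mem_cons_self
    obtain ⟨c, p', hpe⟩ := List.exists_cons_of_ne_nil hp.1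
    have hc : c ≠ '/' := fun h => hp.2 (by rw [hpe, h]; exact List.mem_cons_self)
    cases P' with
    | nil => exact ⟨c, p', by rw [PySem.Chars.join_singleton, hpe], hc⟩
    | cons q Q' =>
      refine ⟨c, p' ++ '/' :: PySem.Chars.join ['/'] (q :: Q'), ?_, hc⟩
      rw [PySem.Chars.join_cons_cons, hpe]; simp

theorem pvRev_join (P : List (List Char)) (hg : pvGood P) (hne : P ≠ []) :
    ∃ c t, (PySem.Chars.join ['/'] P).reverse = c :: t ∧ c ≠ '/' := by
  induction P with
  | nil => exact absurd rfl hne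
  | cons p P' ih =>
    have hp := hg p List.mem_cons_self
    cases P' with
    | nil =>
      obtain ⟨c, p', hpe⟩ := List.exists_cons_of_ne_nil (l := p.reverse) (by simpa using hp.1)
      have hc : c ≠ '/' := by
        intro h
        exact hp.2 (by have : c ∈ p.reverse := by rw [hpe]; exact List.mem_cons_self
                       rw [← h]; simpa using this)
      exact ⟨c, p', by rw [PySem.Chars.join_singleton, hpe], hc⟩
    | cons q Q' =>
      obtain ⟨c, t, ht, hc⟩ := ih (fun x hx => hg x (List.mem_cons_of_mem _ hx)) (by simp)
      refine ⟨c, t ++ '/' :: p.reverse, ?_, hc⟩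
      rw [PySem.Chars.join_cons_cons]
      simp [ht]

theorem pvStrip_norm (P : List (List Char)) (hg : pvGood P) (hne : P ≠ []) :
    PySem.Chars.stripChars ('/' :: PySem.Chars.join ['/'] P) ['/'] = PySem.Chars.join ['/'] P := by
  obtain ⟨c, t, ht, hc⟩ := pvHead_join P hg hne
  obtain ⟨d, u, hu, hd⟩ := pvRev_join P hg hne
  rw [PySem.Chars.stripChars]
  simp only [List.dropWhile_cons]
  rw [if_pos (by simp), ht]
  simp only [List.dropWhile_cons]
  rw [if_neg (by simp [hc]), ← ht, hu]
  simp only [List.dropWhile_cons]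
  rw [if_neg (by simp [hd]), ← hu]
  simp
theorem pvKeyPrefix : ∀ (p q s t : List Char), '/' ∉ p → '/' ∉ q →
    ((p ++ '/' :: s) <+: (q ++ '/' :: t) ↔ p = q ∧ s <+: t) := by
  intro p
  induction p with
  | nil =>
    intro q s t _ hq
    cases q with
    | nil => simp [List.cons_prefix_cons]
    | cons b q' =>
      have hb : b ≠ '/' := fun h => hq (h ▸ List.mem_cons_self)
      simp [List.cons_prefix_cons, Ne.symm hb]
  | cons a p' ih =>
    intro q s t hp hq
    have ha : a ≠ '/' := fun h => hp (h ▸ List.mem_cons_self)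
    have hp' : '/' ∉ p' := fun h => hp (List.mem_cons_of_mem _ h)
    cases q with
    | nil => simp [List.cons_prefix_cons, ha]
    | cons b q' =>
      have hq' : '/' ∉ q' := fun h => hq (List.mem_cons_of_mem _ h)
      simp only [List.cons_append, List.cons_prefix_cons, ih q' s t hp' hq', List.cons.injEq]
      tauto

theorem pvKeyEq (p q s t : List Char) (hp : '/' ∉ p) (hq : '/' ∉ q)
    (h : p ++ '/' :: s = q ++ '/' :: t) : p = q ∧ s = t := by
  have h1 : (p ++ '/' :: s) <+: (q ++ '/' :: t) := h ▸ List.prefix_refl _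
  obtain ⟨hpq, -⟩ := (pvKeyPrefix p q s t hp hq).mp h1
  subst hpq
  exact ⟨rfl, by simpa using List.append_cancel_left h⟩

theorem pvJoin_prefix (P Q : List (List Char)) (hP : pvGood P) (hQ : pvGood Q)
    (hPne : P ≠ []) (hQne : Q ≠ []) :
    (PySem.Chars.join ['/'] Q = PySem.Chars.join ['/'] P ∨
      (PySem.Chars.join ['/'] P ++ ['/']) <+: PySem.Chars.join ['/'] Q) ↔ P <+: Q := by
  induction P generalizing Q with
  | nil => exact absurd rfl hPne
  | cons p P' ih =>
    have hp := hP p List.mem_cons_self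
    have hP' : pvGood P' := fun x hx => hP x (List.mem_cons_of_mem _ hx)
    cases Q with
    | nil => exact absurd rfl hQne
    | cons q Q' =>
      have hq := hQ q List.mem_cons_self
      have hQ' : pvGood Q' := fun x hx => hQ x (List.mem_cons_of_mem _ hx)
      cases P' with
      | nil =>
        cases Q' with
        | nil =>
          rw [PySem.Chars.join_singleton, PySem.Chars.join_singleton]
          constructor
          · rintro (h | h)
            · simp [h]
            · exact absurd (h.subset (by simp)) hq.2
          · intro h
            have : p = q := by simpa [List.cons_prefix_cons] using h
            exact Or.inl this.symm
        | cons q2 Q'' =>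
          rw [PySem.Chars.join_singleton, PySem.Chars.join_cons_cons]
          have hjoin : q ++ ['/'] ++ PySem.Chars.join ['/'] (q2 :: Q'') = q ++ '/' :: PySem.Chars.join ['/'] (q2 :: Q'') := by simp
          rw [hjoin]
          constructor
          · rintro (h | h)
            · exact absurd (by rw [← h]; simp : '/' ∈ p) hp.2
            · have h' : p ++ '/' :: ([] : List Char) <+: q ++ '/' :: PySem.Chars.join ['/'] (q2 :: Q'') := by simpa using h
              obtain ⟨hpq, -⟩ := (pvKeyPrefix p q [] _ hp.2 hq.2).mp h'
              simp [List.cons_prefix_cons, hpq]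
          · intro h
            have hpq : p = q := by simpa [List.cons_prefix_cons] using h
            subst hpq
            exact Or.inr ⟨PySem.Chars.join ['/'] (q2 :: Q''), by simp⟩
      | cons p2 P'' =>
        cases Q' with
        | nil =>
          rw [PySem.Chars.join_singleton, PySem.Chars.join_cons_cons]
          have hjoin : p ++ ['/'] ++ PySem.Chars.join ['/'] (p2 :: P'') = p ++ '/' :: PySem.Chars.join ['/'] (p2 :: P'') := by simp
          rw [hjoin]
          constructor
          · rintro (h | h)
            · exact absurd (by rw [h]; simp : '/' ∈ q) hq.2
            · exact absurd (h.subset (by simp)) hq.2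
          · intro h
            have := h.length_le
            simp at this
        | cons q2 Q'' =>
          rw [PySem.Chars.join_cons_cons, PySem.Chars.join_cons_cons]
          have hjp : p ++ ['/'] ++ PySem.Chars.join ['/'] (p2 :: P'') = p ++ '/' :: PySem.Chars.join ['/'] (p2 :: P'') := by simp
          have hjq : q ++ ['/'] ++ PySem.Chars.join ['/'] (q2 :: Q'') = q ++ '/' :: PySem.Chars.join ['/'] (q2 :: Q'') := by simp
          rw [hjp, hjq]
          have ihx := ih (q2 :: Q'') hP' hQ' (by simp) (by simp)
          constructor
          · rintro (h | h)
            · obtain ⟨hpq, hjj⟩ := pvKeyEq q p _ _ hq.2 hp.2 h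
              have hPQ : (p2 :: P'') <+: (q2 :: Q'') := ihx.mp (Or.inl hjj)
              simp [List.cons_prefix_cons, hpq.symm, hPQ]
            · have h' : p ++ '/' :: (PySem.Chars.join ['/'] (p2 :: P'') ++ ['/']) <+: q ++ '/' :: PySem.Chars.join ['/'] (q2 :: Q'') := by
                simpa using h
              obtain ⟨hpq, hjj⟩ := (pvKeyPrefix p q _ _ hp.2 hq.2).mp h'
              have hPQ : (p2 :: P'') <+: (q2 :: Q'') := ihx.mp (Or.inr hjj)
              simp [List.cons_prefix_cons, hpq, hPQ]
          · intro h
            obtain ⟨hpq, hPQ⟩ := (List.cons_prefix_cons).mp h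
            subst hpq
            rcases ihx.mpr hPQ with h1 | h1
            · exact Or.inl (by rw [h1])
            · refine Or.inr ?_
              have heq : p ++ '/' :: PySem.Chars.join ['/'] (p2 :: P'') ++ ['/'] = p ++ '/' :: (PySem.Chars.join ['/'] (p2 :: P'') ++ ['/']) := by simp
              rw [heq]
              exact (pvKeyPrefix p p _ _ hp.2 hp.2).mpr ⟨rfl, h1⟩

theorem pvNorm_cases (s : List Char) :
    pvNormalize s = ['/'] ∨
      ∃ P, pvGood P ∧ P ≠ [] ∧ pvNormalize s = '/' :: PySem.Chars.join ['/'] P ∧ pvNormalize s ≠ ['/'] := by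
  rw [pvNormalize]
  set parts := (PySem.Chars.splitOn (PySem.Chars.strip s) ['/']).filter (fun p => !p.isEmpty) with hparts
  by_cases hp : parts = []
  · left; simp [hp]
  · right
    have hgood : pvGood parts := by
      intro x hx
      rw [hparts] at hx
      have h1 := List.mem_filter.mp hx
      refine ⟨by simpa using h1.2, ?_⟩
      have h2 : x ∈ pvSplit (PySem.Chars.strip s) [] := by rw [← pvSplitOn_eq]; exact h1.1
      exact pvSplit_no_slash _ [] (by simp) x h2
    refine ⟨parts, hgood, hp, by simp [hp], ?_⟩
    obtain ⟨c, t, hct, -⟩ := pvHead_join parts hgood hp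
    simp [hp, hct]

theorem pvA_branch (P : List (List Char)) (hPg : pvGood P) (hPne : P ≠ []) :
    ((PySem.Chars.splitOn (PySem.Chars.stripChars ('/' :: PySem.Chars.join ['/'] P) ['/']) ['/']).filter (fun p => !p.isEmpty)) = P := by
  rw [pvStrip_norm P hPg hPne, pvSplitOn_eq, pvResplit P hPg hPne]

theorem is_namespace_prefix_py_spec' (left right : String) :
    is_namespace_prefix_py left right = is_namespace_prefix_py_alt left right := by
  rw [is_namespace_prefix_py, is_namespace_prefix_py_alt]
  rcases pvNorm_cases left.toList with hl | ⟨P, hPg, hPne, hl, hlne⟩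
  · simp [hl]
  · rcases pvNorm_cases right.toList with hr | ⟨Q, hQg, hQne, hr, hrne⟩
    · simp [hl, hr]
    · simp only [hl, hr]
      rw [pvA_branch P hPg hPne, pvA_branch Q hQg hQne]
      -- LHS: if P.length > Q.length then false else slice Q [:len P] == P
      -- RHS: ('/'::jn Q == '/'::jn P) || startswith ('/'::jn Q) (('/'::jn P) ++ ['/'])
      have hslice : PySem.List.slice Q none (some (P.length : Int)) = Q.take P.length :=
        PySem.List.slice_to_natCast Q P.length
      have hA : (if P.length > Q.length then false
            else PySem.List.slice Q none (some (P.length : Int)) == P) = decide (P <+: Q) := by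
        by_cases hlen : P.length > Q.length
        · rw [if_pos hlen]
          have : ¬ P <+: Q := fun h => absurd h.length_le (by omega)
          simp [this]
        · rw [if_neg hlen, hslice, Bool.eq_iff_iff]
          simp only [beq_iff_eq, decide_eq_true_eq]
          exact ⟨fun hq => List.prefix_iff_eq_take.mpr hq.symm,
                 fun h => (List.prefix_iff_eq_take.mp h).symm⟩
      have hB : (('/' :: PySem.Chars.join ['/'] Q == '/' :: PySem.Chars.join ['/'] P) ||
            PySem.Chars.startswith ('/' :: PySem.Chars.join ['/'] Q) (('/' :: PySem.Chars.join ['/'] P) ++ ['/'])) = decide (P <+: Q) := by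
        rw [PySem.Chars.startswith]
        have h1 : ('/' :: PySem.Chars.join ['/'] Q == '/' :: PySem.Chars.join ['/'] P) =
            decide (PySem.Chars.join ['/'] Q = PySem.Chars.join ['/'] P) := by
          rw [Bool.eq_iff_iff]
          simp only [beq_iff_eq, decide_eq_true_eq, List.cons.injEq, true_and]
        have h2 : (('/' :: PySem.Chars.join ['/'] P) ++ ['/']).isPrefixOf ('/' :: PySem.Chars.join ['/'] Q) =
            decide ((PySem.Chars.join ['/'] P ++ ['/']) <+: PySem.Chars.join ['/'] Q) := by
          rw [Bool.eq_iff_iff]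
          simp only [List.isPrefixOf_iff_prefix, decide_eq_true_eq, List.cons_append,
            List.cons_prefix_cons, true_and]
        rw [h1, h2, ← Bool.decide_or, decide_eq_decide]
        exact pvJoin_prefix P Q hPg hQg hPne hQne
      rw [hA, hB]

-- ===== VERDICT (by name: the statement is the Claim_ definition above) =====
theorem is_namespace_prefix_py_spec : Claim_equal_is_namespace_prefix_py := by
  intro left right _
  unfold Spec_is_namespace_prefix_py
  exact is_namespace_prefix_py_spec' left right
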